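-- pv_equiv track=rewrite | github.com/caojm/account_cn | report/account_balance_report.py | _filter_account_code
-- ===== SOURCE A (Python) =====
-- def _filter_account_code(account_code_name):
--     account_code = sorted(account_code_name.keys())
--     account_code_yes = set()
--     account_code_no = set()
--     for ac in account_code:
--         find_parent = False
--         for i in range(1, len(ac)):
--             if ac[:-i] in account_code_yes or ac[:-i] in account_code_no:
--                 find_parent = True
--                 account_code_no.add(ac)
--                 break
--             else:
--                 continue
--         if not find_parent:
--             account_code_yes.add(ac)
--     return sorted(account_code_yes)
-- ===== SOURCE B (Python) =====
-- def _filter_account_code(account_code_name):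
--     # One pass over the sorted codes: a code has a proper non-empty prefix among
--     # the codes iff the most recently kept code is a non-empty prefix of it.
--     result = []
--     for code in sorted(account_code_name.keys()):
--         last = result[-1] if result else None
--         if last is not None and last != "" and code.startswith(last):
--             continue
--         result.append(code)
--     return result
-- ===== Notes on version B (the rewrite author's own statement) =====
-- stated objective: faster
-- what changed: Replaces the yes/no sets plus the inner loop that slices and hash-probes every proper prefix of each code by a single pass over the sorted codes that compares each code only with the last kept code (one startswith), using the fact that a code has a proper non-empty prefix among the codes iff the last kept code is a non-empty prefix of it.
import Mathlib
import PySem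

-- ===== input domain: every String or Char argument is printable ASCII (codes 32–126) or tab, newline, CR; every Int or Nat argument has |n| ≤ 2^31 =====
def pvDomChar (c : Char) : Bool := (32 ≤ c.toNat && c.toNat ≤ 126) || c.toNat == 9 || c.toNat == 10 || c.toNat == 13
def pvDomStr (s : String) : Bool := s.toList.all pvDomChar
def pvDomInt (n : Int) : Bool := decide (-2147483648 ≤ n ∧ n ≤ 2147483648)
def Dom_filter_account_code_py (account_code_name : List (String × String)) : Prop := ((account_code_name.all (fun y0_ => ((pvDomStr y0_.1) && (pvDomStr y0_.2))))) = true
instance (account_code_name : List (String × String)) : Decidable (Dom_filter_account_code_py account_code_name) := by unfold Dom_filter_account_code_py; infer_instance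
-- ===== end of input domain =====

-- B replaces A's yes/no sets and per-code inner loop over every proper prefix (slice + two
-- set probes each) by a single pass over the sorted codes that compares each code only with
-- the last kept code; objective: faster (a timing run measures the speed-up).


-- ===== PORT A =====
-- inner 'for i in range(1, len(ac)): … break' loop of A, with the break as the first hit
def pvInnerA (yes no : PySem.Set String) (ac : String) : List Int → PySem.Set String × PySem.Set String
  | [] => (PySem.Set.add yes ac, no)
  | i :: rest =>
      let pfx := PySem.Str.slice ac none (some (-i))
      if PySem.Set.contains yes pfx || PySem.Set.contains no pfx then
        (yes, PySem.Set.add no ac)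
      else
        pvInnerA yes no ac rest

def filter_account_code_py (account_code_name : List (String × String)) : List String :=
  let account_code := PySem.List.sorted (PySem.Dict.keys (PySem.Dict.ofList account_code_name)) (fun x => x)
  let st := account_code.foldl
    (fun st ac => pvInnerA st.1 st.2 ac (PySem.List.pyRange 1 (PySem.Str.len ac)))
    (PySem.Set.empty, PySem.Set.empty)
  PySem.List.sorted st.1 (fun x => x)

-- ===== PORT B =====
def filter_account_code_py_alt (account_code_name : List (String × String)) : List String :=
  (PySem.List.sorted (PySem.List.dedup (account_code_name.map Prod.fst)) (fun x => x)).foldl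
    (fun result code =>
      let skip : Bool :=
        match result.getLast? with
        | some last => last ≠ "" && PySem.Str.startswith code last
        | none => false
      if skip then result else result ++ [code])
    []

-- ===== PRECONDITION & SPEC =====
def Spec_filter_account_code_py (account_code_name : List (String × String)) (out : List String) : Prop := out = filter_account_code_py_alt account_code_name
instance (account_code_name : List (String × String)) (out : List String) : Decidable (Spec_filter_account_code_py account_code_name out) := by unfold Spec_filter_account_code_py; infer_instance

-- ===== CLAIM (what is proved, stated in full; the proofs are below) =====
def Claim_equal_filter_account_code_py : Prop := ∀ (account_code_name : List (String × String)), Dom_filter_account_code_py account_code_name → Spec_filter_account_code_py account_code_name (filter_account_code_py account_code_name)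

-- ===== LEMMAS AND PROOFS =====

-- c has a proper non-empty prefix among the codes K
def pvHasParent (K : List String) (c : String) : Prop :=
  ∃ t ∈ K, t ≠ "" ∧ t ≠ c ∧ t.toList <+: c.toList

-- a list is strictly below its extension by a non-empty tail (lexicographic)
theorem pvlist_lt_append (p : List Char) (r : List Char) (hr : r ≠ []) : p < p ++ r := by
  induction p with
  | nil =>
      cases r with
      | nil => exact absurd rfl hr
      | cons a r' => exact List.nil_lt_cons a r'
  | cons a p' ih => exact List.cons_lt_cons_iff.mpr (Or.inr ⟨rfl, ih⟩)

-- a proper prefix is lexicographically smaller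
theorem pvPrefix_lt (t c : String) (h : t.toList <+: c.toList) (hne : t ≠ c) : t < c := by
  rw [String.lt_iff_toList_lt]
  obtain ⟨r, hr⟩ := h
  rcases eq_or_ne r [] with rfl | hr0
  · exact absurd (String.toList_inj.mp (by rw [← hr, List.append_nil])) hne
  · rw [← hr]; exact pvlist_lt_append _ _ hr0

-- betweenness: a prefix of c is a prefix of anything between it and c
theorem pvlist_between : ∀ (p s c : List Char), p <+: c → ¬ s < p → ¬ c < s → p <+: s := by
  intro p
  induction p with
  | nil => intro s c _ _ _; exact List.nil_prefix
  | cons a p' ih =>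
      intro s c hpc hsp hcs
      obtain ⟨c', rfl, hp'c'⟩ := List.cons_prefix_iff.mp hpc
      cases s with
      | nil => exact absurd (List.nil_lt_cons a p') hsp
      | cons b s' =>
          rcases lt_trichotomy a b with hab | rfl | hba
          · exact absurd (List.cons_lt_cons_iff.mpr (Or.inl hab)) hcs
          · have h1 : ¬ s' < p' := fun h => hsp (List.cons_lt_cons_iff.mpr (Or.inr ⟨rfl, h⟩))
            have h2 : ¬ c' < s' := fun h => hcs (List.cons_lt_cons_iff.mpr (Or.inr ⟨rfl, h⟩))
            exact List.cons_prefix_iff.mpr ⟨s', rfl, ih s' c' hp'c' h1 h2⟩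
          · exact absurd (List.cons_lt_cons_iff.mpr (Or.inl hba)) hsp

-- A's inner loop returns on the first prefix found in either set
theorem pvInnerA_eq (yes no : PySem.Set String) (ac : String) (is : List Int) :
    pvInnerA yes no ac is =
      if is.any (fun i => PySem.Set.contains yes (PySem.Str.slice ac none (some (-i))) ||
                          PySem.Set.contains no (PySem.Str.slice ac none (some (-i)))) then
        (yes, PySem.Set.add no ac)
      else (PySem.Set.add yes ac, no) := by
  induction is with
  | nil => simp [pvInnerA]
  | cons i rest ih =>
      simp only [pvInnerA, List.any_cons, ih]
      by_cases h : (PySem.Str.slice ac none (some (-i)) ∈ yes ∨ PySem.Str.slice ac none (some (-i)) ∈ no)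
      · simp [h]
      · simp [h]

-- the scan over range(1, len(ac)) finds a member of S iff S holds a proper non-empty prefix of ac
theorem pvAny_iff (S : List String) (ac : String) :
    ((PySem.List.pyRange 1 (PySem.Str.len ac)).any
        (fun i => decide ((PySem.Str.slice ac none (some (-i))) ∈ S)) = true)
      ↔ ∃ t ∈ S, t ≠ "" ∧ t ≠ ac ∧ t.toList <+: ac.toList := by
  have hlen : PySem.Str.len ac = (ac.toList.length : Int) := by
    simp [PySem.Str.len, String.length_toList]
  have hLL : ac.toList.length = ac.length := String.length_toList
  have hslice : ∀ k : Nat, 0 < k →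
      (PySem.Str.slice ac none (some (-(k : Int)))).toList = ac.toList.take (ac.toList.length - k) := by
    intro k hk
    rw [PySem.Str.toList_slice, PySem.Chars.slice_eq_listSlice, PySem.List.slice_to_neg_natCast _ _ hk]
  rw [List.any_eq_true]
  constructor
  · rintro ⟨i, hi, ht⟩
    rw [PySem.List.mem_pyRange_one, hlen] at hi
    simp only [decide_eq_true_eq] at ht
    set k : Nat := i.toNat with hk
    have hik : i = (k : Int) := by omega
    have hk0 : 0 < k := by omega
    have hklt : k < ac.toList.length := by omega
    refine ⟨_, ht, ?_, ?_, ?_⟩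
    · intro h
      have h2 := congrArg String.toList h
      rw [hik, hslice k hk0] at h2
      have h3 := congrArg List.length h2
      simp [List.length_take] at h3
      omega
    · intro h
      have h2 := congrArg String.toList h
      rw [hik, hslice k hk0] at h2
      have h3 := congrArg List.length h2
      simp [List.length_take] at h3
      omega
    · rw [hik, hslice k hk0]; exact List.take_prefix _ _
  · rintro ⟨t, htS, hne, hnac, hpre⟩
    have hm1 : 1 ≤ t.toList.length := by
      rcases Nat.eq_zero_or_pos t.toList.length with h | h
      · exact absurd (String.toList_eq_nil_iff.mp (List.length_eq_zero_iff.mp h)) hne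
      · exact h
    have hmle : t.toList.length ≤ ac.toList.length := hpre.length_le
    have hmlt : t.toList.length < ac.toList.length := by
      rcases lt_or_eq_of_le hmle with h | h
      · exact h
      · exact absurd (String.toList_inj.mp (hpre.eq_of_length h)) hnac
    refine ⟨((ac.toList.length - t.toList.length : Nat) : Int), ?_, ?_⟩
    · rw [PySem.List.mem_pyRange_one, hlen]; omega
    · simp only [decide_eq_true_eq]
      have : (PySem.Str.slice ac none (some (-((ac.toList.length - t.toList.length : Nat) : Int)))).toList = t.toList := by
        rw [hslice _ (by omega)]
        have : ac.toList.length - (ac.toList.length - t.toList.length) = t.toList.length := by omega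
        rw [this, ← List.prefix_iff_eq_take.mp hpre]
      rwa [String.toList_inj.mp this]



-- c is kept: it has no proper non-empty prefix among the codes K
def pvKeep (K : List String) (c : String) : Bool :=
  !(K.any fun t => !(t == "") && !(t == c) && t.toList.isPrefixOf c.toList)

theorem pvKeep_false_iff (K : List String) (c : String) :
    pvKeep K c = false ↔ pvHasParent K c := by
  simp [pvKeep, pvHasParent, List.any_eq_true, List.isPrefixOf_iff_prefix, and_assoc]

theorem pvKeep_true_iff (K : List String) (c : String) :
    pvKeep K c = true ↔ ¬ pvHasParent K c := by
  rw [← pvKeep_false_iff]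
  cases pvKeep K c <;> simp

-- the two filter halves together hold exactly the processed codes
theorem pvMem_parts (l : List String) (p : String → Bool) (t : String) :
    t ∈ l.filter p ++ l.filter (fun c => !p c) ↔ t ∈ l := by
  constructor
  · intro h; rcases List.mem_append.mp h with h | h <;> exact (List.mem_filter.mp h).1
  · intro h; by_cases hp : p t = true
    · exact List.mem_append.mpr (Or.inl (List.mem_filter.mpr ⟨h, hp⟩))
    · exact List.mem_append.mpr (Or.inr (List.mem_filter.mpr ⟨h, by simp [hp]⟩))

-- a parent among the already-processed codes is the same as a parent among all codes
theorem pvParent_done_iff (ks done rest : List String) (c : String)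
    (hs : ks.Pairwise (· < ·)) (hks : ks = done ++ c :: rest) :
    (∃ t ∈ done, t ≠ "" ∧ t ≠ c ∧ t.toList <+: c.toList) ↔ pvHasParent ks c := by
  constructor
  · rintro ⟨t, ht, h⟩; exact ⟨t, by rw [hks]; exact List.mem_append_left _ ht, h⟩
  · rintro ⟨t, htks, h1, h2, h3⟩
    refine ⟨t, ?_, h1, h2, h3⟩
    have hlt : t < c := pvPrefix_lt t c h3 h2
    rw [hks] at htks
    rcases List.mem_append.mp htks with h | h
    · exact h
    · exfalso
      rw [hks, List.pairwise_append] at hs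
      rcases List.mem_cons.mp h with rfl | h
      · exact lt_irrefl _ hlt
      · exact lt_asymm hlt ((List.pairwise_cons.mp hs.2.1).1 t h)

theorem pvNotMem_done (ks done rest : List String) (c : String)
    (hs : ks.Pairwise (· < ·)) (hks : ks = done ++ c :: rest) : c ∉ done := by
  intro hc
  rw [hks, List.pairwise_append] at hs
  exact lt_irrefl c (hs.2.2 c hc c (List.mem_cons_self ..))

-- A's per-code test over the processed state decides pvHasParent
theorem pvStep_cond (ks done rest : List String) (c : String)
    (hs : ks.Pairwise (· < ·)) (hks : ks = done ++ c :: rest) :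
    (((PySem.List.pyRange 1 (PySem.Str.len c)).any
        (fun i => PySem.Set.contains (done.filter (pvKeep ks)) (PySem.Str.slice c none (some (-i))) ||
                  PySem.Set.contains (done.filter (fun x => !pvKeep ks x)) (PySem.Str.slice c none (some (-i))))) = true)
      ↔ pvHasParent ks c := by
  have hfun : (fun i => PySem.Set.contains (done.filter (pvKeep ks)) (PySem.Str.slice c none (some (-i))) ||
                  PySem.Set.contains (done.filter (fun x => !pvKeep ks x)) (PySem.Str.slice c none (some (-i))))
      = (fun i => decide ((PySem.Str.slice c none (some (-i))) ∈
            (done.filter (pvKeep ks) ++ done.filter (fun x => !pvKeep ks x)))) := by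
    funext i
    rw [PySem.Set.contains_eq_decide, PySem.Set.contains_eq_decide]
    simp [List.mem_append]
  rw [hfun, pvAny_iff]
  rw [← pvParent_done_iff ks done rest c hs hks]
  constructor
  · rintro ⟨t, ht, h⟩; exact ⟨t, (pvMem_parts done (pvKeep ks) t).mp ht, h⟩
  · rintro ⟨t, ht, h⟩; exact ⟨t, (pvMem_parts done (pvKeep ks) t).mpr ht, h⟩

-- invariant of A's main loop
theorem pvA_loop (ks : List String) (hs : ks.Pairwise (· < ·)) :
    ∀ (todo done : List String), ks = done ++ todo →
      todo.foldl (fun st ac => pvInnerA st.1 st.2 ac (PySem.List.pyRange 1 (PySem.Str.len ac)))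
          (done.filter (pvKeep ks), done.filter (fun x => !pvKeep ks x))
        = (ks.filter (pvKeep ks), ks.filter (fun x => !pvKeep ks x)) := by
  intro todo
  induction todo with
  | nil => intro done h; rw [List.append_nil] at h; subst h; rfl
  | cons c todo' ih =>
      intro done hks
      have hcnd : c ∉ done := pvNotMem_done ks done todo' c hs hks
      rw [List.foldl_cons, pvInnerA_eq]
      have hcond := pvStep_cond ks done todo' c hs hks
      have hks' : ks = (done ++ [c]) ++ todo' := by rw [hks, List.append_assoc]; rfl
      by_cases hp : pvHasParent ks c
      · rw [if_pos (hcond.mpr hp)]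
        have hadd : PySem.Set.add (done.filter (fun x => !pvKeep ks x)) c
            = done.filter (fun x => !pvKeep ks x) ++ [c] := by
          have hnm : c ∉ done.filter (fun x => !pvKeep ks x) := fun h => hcnd (List.mem_filter.mp h).1
          have : ((done.filter (fun x => !pvKeep ks x)).contains c) = false := by simpa using hnm
          simp [PySem.Set.add, PySem.Set.contains, this]
          exact fun h => absurd h hcnd
        have hk := (pvKeep_false_iff ks c).mpr hp
        have h1 : (done ++ [c]).filter (pvKeep ks) = done.filter (pvKeep ks) := by
          rw [List.filter_append]; simp [List.filter_cons, hk]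
        have h2 : (done ++ [c]).filter (fun x => !pvKeep ks x)
            = done.filter (fun x => !pvKeep ks x) ++ [c] := by
          rw [List.filter_append]; simp [List.filter_cons, hk]
        rw [hadd, ← h1, ← h2]
        exact ih (done ++ [c]) hks'
      · rw [if_neg (fun h => hp (hcond.mp h))]
        have hadd : PySem.Set.add (done.filter (pvKeep ks)) c
            = done.filter (pvKeep ks) ++ [c] := by
          have hnm : c ∉ done.filter (pvKeep ks) := fun h => hcnd (List.mem_filter.mp h).1
          have : ((done.filter (pvKeep ks)).contains c) = false := by simpa using hnm
          simp [PySem.Set.add, PySem.Set.contains, this]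
          exact fun h => absurd h hcnd
        have hk := (pvKeep_true_iff ks c).mpr hp
        have h1 : (done ++ [c]).filter (pvKeep ks) = done.filter (pvKeep ks) ++ [c] := by
          rw [List.filter_append]; simp [List.filter_cons, hk]
        have h2 : (done ++ [c]).filter (fun x => !pvKeep ks x)
            = done.filter (fun x => !pvKeep ks x) := by
          rw [List.filter_append]; simp [List.filter_cons, hk]
        rw [hadd, ← h1, ← h2]
        exact ih (done ++ [c]) hks'

-- if some processed code is a non-empty proper prefix of c, the LAST KEPT processed code is one
theorem pvLastKept (ks : List String) (hs : ks.Pairwise (· < ·)) (c : String) :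
    ∀ done : List String, done <+: ks → (∀ x ∈ done, x < c) →
    ∀ t ∈ done, t ≠ "" → t.toList <+: c.toList →
    ∃ last, (done.filter (pvKeep ks)).getLast? = some last ∧ last ≠ "" ∧ last.toList <+: c.toList := by
  intro done
  induction done using List.reverseRecOn with
  | nil => intro _ _ t ht; simp at ht
  | append_singleton done' d ih =>
      intro hpre hlt t ht hne hpfx
      have hpre' : done' <+: ks := (List.prefix_append done' [d]).trans hpre
      have hlt' : ∀ x ∈ done', x < c := fun x hx => hlt x (List.mem_append_left _ hx)
      have hdpair : ∀ x ∈ done', x < d := by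
        have hp : (done' ++ [d]).Pairwise (· < ·) := hs.sublist hpre.sublist
        rw [List.pairwise_append] at hp
        intro x hx; exact hp.2.2 x hx d (by simp)
      by_cases hd : pvHasParent ks d
      · have hk := (pvKeep_false_iff ks d).mpr hd
        have hfil : (done' ++ [d]).filter (pvKeep ks) = done'.filter (pvKeep ks) := by
          rw [List.filter_append]; simp [List.filter_cons, hk]
        rw [hfil]
        rcases List.mem_append.mp ht with ht' | htd
        · exact ih hpre' hlt' t ht' hne hpfx
        · have htd : t = d := by simpa using htd
          subst htd
          obtain ⟨t', ht'ks, h1, h2, h3⟩ := hd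
          have hlt2 : t' < t := pvPrefix_lt t' t h3 h2
          have ht'done : t' ∈ done' := by
            obtain ⟨r, hr⟩ := hpre
            rw [← hr, List.pairwise_append] at hs
            rw [← hr] at ht'ks
            rcases List.mem_append.mp ht'ks with h | h
            · rcases List.mem_append.mp h with h | h
              · exact h
              · exfalso
                have : t' = t := by simpa using h
                subst this; exact lt_irrefl _ hlt2
            · exfalso
              exact lt_asymm hlt2 (hs.2.2 t (List.mem_append_right _ (by simp)) t' h)
          exact ih hpre' hlt' t' ht'done h1 (h3.trans hpfx)
      · have hk := (pvKeep_true_iff ks d).mpr hd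
        have hfil : (done' ++ [d]).filter (pvKeep ks) = done'.filter (pvKeep ks) ++ [d] := by
          rw [List.filter_append]; simp [List.filter_cons, hk]
        have hgood : d ≠ "" ∧ d.toList <+: c.toList := by
          rcases List.mem_append.mp ht with ht' | htd
          · exfalso
            have htd' : t < d := hdpair t ht'
            have hdc : d < c := hlt d (by simp)
            have hb : t.toList <+: d.toList := by
              apply pvlist_between t.toList d.toList c.toList hpfx
              · intro h
                exact lt_asymm (String.lt_iff_toList_lt.mp htd') h
              · intro h
                exact lt_asymm (String.lt_iff_toList_lt.mp hdc) h
            exact hd ⟨t, hpre.subset (List.mem_append_left _ ht'), hne, ne_of_lt htd', hb⟩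
          · have : t = d := by simpa using htd
            subst this; exact ⟨hne, hpfx⟩
        exact ⟨d, by rw [hfil]; exact List.getLast?_concat, hgood.1, hgood.2⟩

-- B's per-code test (compare with the last kept code only) also decides pvHasParent
theorem pvBStep_cond (ks done rest : List String) (c : String)
    (hs : ks.Pairwise (· < ·)) (hks : ks = done ++ c :: rest) :
    ((match (done.filter (pvKeep ks)).getLast? with
      | some last => last ≠ "" && PySem.Str.startswith c last
      | none => false) = true)
      ↔ pvHasParent ks c := by
  have hltdone : ∀ x ∈ done, x < c := by
    rw [hks, List.pairwise_append] at hs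
    intro x hx; exact hs.2.2 x hx c (by simp)
  constructor
  · intro h
    cases hg : (done.filter (pvKeep ks)).getLast? with
    | none => rw [hg] at h; simp at h
    | some last =>
        rw [hg] at h
        simp only [Bool.and_eq_true, decide_eq_true_eq, ne_eq] at h
        have hmem : last ∈ done := (List.mem_filter.mp (List.mem_of_getLast? hg)).1
        have hpfx : last.toList <+: c.toList := by
          have := h.2
          rw [PySem.Str.startswith_eq] at this
          exact (PySem.Chars.startswith_iff _ _).mp this
        exact ⟨last, by rw [hks]; exact List.mem_append_left _ hmem,
          by simpa using h.1, ne_of_lt (hltdone last hmem), hpfx⟩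
  · intro hp
    obtain ⟨t, htdone, h1, _, h3⟩ := (pvParent_done_iff ks done rest c hs hks).mpr hp
    obtain ⟨last, hg, hne, hpfx⟩ :=
      pvLastKept ks hs c done ⟨c :: rest, hks.symm⟩ hltdone t htdone h1 h3
    rw [hg]
    simp only [Bool.and_eq_true, decide_eq_true_eq, ne_eq]
    refine ⟨by simpa using hne, ?_⟩
    rw [PySem.Str.startswith_eq]
    exact (PySem.Chars.startswith_iff _ _).mpr hpfx

-- invariant of B's single pass
theorem pvB_loop (ks : List String) (hs : ks.Pairwise (· < ·)) :
    ∀ (todo done : List String), ks = done ++ todo →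
      todo.foldl (fun result code =>
          let skip : Bool :=
            match result.getLast? with
            | some last => last ≠ "" && PySem.Str.startswith code last
            | none => false
          if skip then result else result ++ [code])
        (done.filter (pvKeep ks)) = ks.filter (pvKeep ks) := by
  intro todo
  induction todo with
  | nil => intro done h; rw [List.append_nil] at h; subst h; rfl
  | cons c todo' ih =>
      intro done hks
      rw [List.foldl_cons]
      have hcond := pvBStep_cond ks done todo' c hs hks
      have hks' : ks = (done ++ [c]) ++ todo' := by rw [hks, List.append_assoc]; rfl
      by_cases hp : pvHasParent ks c
      · simp only [if_pos (hcond.mpr hp)]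
        have hk := (pvKeep_false_iff ks c).mpr hp
        have h1 : (done ++ [c]).filter (pvKeep ks) = done.filter (pvKeep ks) := by
          rw [List.filter_append]; simp [List.filter_cons, hk]
        rw [← h1]
        exact ih (done ++ [c]) hks'
      · simp only [if_neg (fun h => hp (hcond.mp h))]
        have hk := (pvKeep_true_iff ks c).mpr hp
        have h1 : (done ++ [c]).filter (pvKeep ks) = done.filter (pvKeep ks) ++ [c] := by
          rw [List.filter_append]; simp [List.filter_cons, hk]
        rw [← h1]
        exact ih (done ++ [c]) hks'

-- A = B pointwise: both return the sorted codes that have no proper non-empty prefix among the codes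
theorem pvMain (account_code_name : List (String × String)) :
    filter_account_code_py account_code_name = filter_account_code_py_alt account_code_name := by
  have hkeys : (PySem.Dict.ofList account_code_name).keys
      = PySem.List.dedup (account_code_name.map Prod.fst) := by
    simp [PySem.Dict.ofList, PySem.Dict.update,
      PySem.Dict.keys_foldl_insert_key (key := Prod.fst) (f := fun d p => p.2),
      PySem.Set.update_nil_left]
  simp only [filter_account_code_py, filter_account_code_py_alt, hkeys, PySem.Set.empty]
  set ks := PySem.List.sorted (PySem.List.dedup (account_code_name.map Prod.fst)) (fun x => x) with hksdef
  have hs : ks.Pairwise (· < ·) := by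
    rw [hksdef, PySem.List.dedup_eq_ofList]
    exact PySem.List.sorted_ofList_pairwise_lt _
  have hA := pvA_loop ks hs ks [] rfl
  have hB := pvB_loop ks hs ks [] rfl
  simp only [List.filter_nil] at hA hB
  rw [hA]
  dsimp only
  rw [PySem.List.sorted_eq_self_of_pairwise _ _ ((hs.filter _).imp le_of_lt)]
  exact hB.symm

-- ===== VERDICT (by name: the statement is the Claim_ definition above) =====
theorem filter_account_code_py_spec : Claim_equal_filter_account_code_py := by
  intro m _
  unfold Spec_filter_account_code_py
  exact pvMain m
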